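-- pv_equiv track=rewrite | github.com/OlivierKabengele/NLP_Oli | Lab2/nbc.py | build_merged_vocab
-- ===== SOURCE A (Python) =====
-- def build_merged_vocab(pages_tokens, lab1_word_to_idx, max_new_words=None):
--     """
--     Keep Lab1 indices intact; append new words with new indices.
--     Returns merged_word_to_idx and a list of new words in order.
--     """
--     merged = dict(lab1_word_to_idx)  # keep existing indices
--     next_idx = max(merged.values()) + 1 if merged else 0
--     new_words = []
--     for page in pages_tokens:
--         for w in page:
--             if w not in merged:
--                 if (max_new_words is not None) and (len(new_words) >= max_new_words):
--                     continue
--                 merged[w] = next_idx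
--                 new_words.append(w)
--                 next_idx += 1
--     # Add UNK if not present
--     if "<unk>" not in merged:
--         merged["<unk>"] = next_idx
--     return merged, new_words
-- ===== SOURCE B (Python) =====
-- def build_merged_vocab(pages_tokens, lab1_word_to_idx, max_new_words=None):
--     merged = dict(lab1_word_to_idx)
--     # dedup the whole corpus first (first occurrences), then filter and slice
--     ordered = dict.fromkeys(w for page in pages_tokens for w in page)
--     new_words = [w for w in ordered if w not in merged]
--     if max_new_words is not None:
--         new_words = new_words[:max(0, max_new_words)]
--     base = max(merged.values()) + 1 if merged else 0
--     for i, w in enumerate(new_words):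
--         merged[w] = base + i
--     if "<unk>" not in merged:
--         merged["<unk>"] = base + len(new_words)
--     return merged, new_words
-- ===== Notes on version B (the rewrite author's own statement) =====
-- stated objective: alternative
-- what changed: A's single guarded scan that interleaves membership tests against the growing merged dict, cap checks and index assignment is replaced by a pipeline: dedup the whole corpus first (dict.fromkeys), filter out words already in lab1, slice to the cap, then batch-assign indices from a base computed once.
import Mathlib
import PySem

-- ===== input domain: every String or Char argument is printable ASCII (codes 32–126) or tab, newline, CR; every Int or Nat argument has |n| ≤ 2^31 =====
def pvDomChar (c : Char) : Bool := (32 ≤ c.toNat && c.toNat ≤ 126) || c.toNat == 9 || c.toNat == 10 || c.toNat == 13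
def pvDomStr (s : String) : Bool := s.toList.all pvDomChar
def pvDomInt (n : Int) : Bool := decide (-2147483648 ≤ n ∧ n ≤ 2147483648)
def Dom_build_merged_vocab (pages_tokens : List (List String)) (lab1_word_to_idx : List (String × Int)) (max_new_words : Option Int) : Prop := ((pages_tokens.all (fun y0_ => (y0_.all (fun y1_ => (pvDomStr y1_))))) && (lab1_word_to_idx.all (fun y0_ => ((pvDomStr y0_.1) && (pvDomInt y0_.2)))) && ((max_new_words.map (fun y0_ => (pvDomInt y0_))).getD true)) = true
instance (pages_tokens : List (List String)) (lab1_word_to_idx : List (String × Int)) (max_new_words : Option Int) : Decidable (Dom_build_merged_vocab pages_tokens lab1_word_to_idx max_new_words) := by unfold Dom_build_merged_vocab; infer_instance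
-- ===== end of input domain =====

-- B replaces A's single guarded scan (membership against the growing dict, cap check and
-- index assignment interleaved) by a pipeline: dedup the whole corpus, filter out lab1 words,
-- slice to the cap, then batch-assign indices; same return value, similar cost (objective: alternative).

-- ===== PORT A =====
-- A's loop state: (merged dict, next_idx, new_words)
def build_merged_vocab (pages_tokens : List (List String)) (lab1_word_to_idx : List (String × Int)) (max_new_words : Option Int) : (List (String × Int)) × List String :=
  let merged0 : PySem.Dict String Int := PySem.Dict.ofList lab1_word_to_idx
  let next_idx0 : Int := match PySem.List.max? merged0.values (fun x => x) with
    | some m => m + 1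
    | none => 0
  let st := pages_tokens.foldl (fun st page =>
    page.foldl (fun (st : PySem.Dict String Int × Int × List String) w =>
      if st.1.contains w then st
      else if (match max_new_words with
               | some k => decide ((st.2.2.length : Int) ≥ k)
               | none => false) then st
      else (st.1.insert w st.2.1, st.2.1 + 1, st.2.2 ++ [w])) st)
    (merged0, next_idx0, ([] : List String))
  let merged := if st.1.contains "<unk>" then st.1 else st.1.insert "<unk>" st.2.1
  (merged.items, st.2.2)

-- ===== PORT B =====
def build_merged_vocab_alt (pages_tokens : List (List String)) (lab1_word_to_idx : List (String × Int)) (max_new_words : Option Int) : (List (String × Int)) × List String :=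
  let merged0 : PySem.Dict String Int := PySem.Dict.ofList lab1_word_to_idx
  -- dict.fromkeys over the flattened generator = ordered dedup
  let ordered : List String := PySem.List.dedup (pages_tokens.flatMap (fun page => page))
  let nw0 : List String := ordered.filter (fun w => !(merged0.contains w))
  -- xs[:max(0, k)] with a nonnegative bound is List.take (exact)
  let new_words : List String := match max_new_words with
    | none => nw0
    | some k => nw0.take (max 0 k).toNat
  let base : Int := match PySem.List.max? merged0.values (fun x => x) with
    | some m => m + 1
    | none => 0
  let merged := (PySem.List.enumerate new_words 0).foldl
    (fun (d : PySem.Dict String Int) iw => d.insert iw.2 (base + iw.1)) merged0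
  let merged := if merged.contains "<unk>" then merged
    else merged.insert "<unk>" (base + (new_words.length : Int))
  (merged.items, new_words)

-- ===== PRECONDITION & SPEC =====
def Spec_build_merged_vocab (pages_tokens : List (List String)) (lab1_word_to_idx : List (String × Int)) (max_new_words : Option Int) (out : (List (String × Int)) × List String) : Prop := out = build_merged_vocab_alt pages_tokens lab1_word_to_idx max_new_words
instance (pages_tokens : List (List String)) (lab1_word_to_idx : List (String × Int)) (max_new_words : Option Int) (out : (List (String × Int)) × List String) : Decidable (Spec_build_merged_vocab pages_tokens lab1_word_to_idx max_new_words out) := by unfold Spec_build_merged_vocab; infer_instance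

-- ===== CLAIM (what is proved, stated in full; the proofs are below) =====
def Claim_equal_build_merged_vocab : Prop := ∀ (pages_tokens : List (List String)) (lab1_word_to_idx : List (String × Int)) (max_new_words : Option Int), Dom_build_merged_vocab pages_tokens lab1_word_to_idx max_new_words → Spec_build_merged_vocab pages_tokens lab1_word_to_idx max_new_words (build_merged_vocab pages_tokens lab1_word_to_idx max_new_words)

-- ===== LEMMAS AND PROOFS =====

-- the dict after assigning indices base, base+1, … to the words of nw (shared shape of both ports' final dict)
def pvD (m0 : PySem.Dict String Int) (base : Int) (nw : List String) : PySem.Dict String Int :=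
  (PySem.List.enumerate nw 0).foldl (fun d iw => d.insert iw.2 (base + iw.1)) m0

-- A's limit test (len(new_words) >= max_new_words, with None meaning no limit)
def pvLimGe (mx : Option Int) (n : Nat) : Bool :=
  match mx with
  | some k => decide ((n : Int) ≥ k)
  | none => false

-- the list of new words A's loop collects, as a recursion on the token stream
def pvCollect (mx : Option Int) (m0 : PySem.Dict String Int) : List String → List String → List String
  | [], nw => nw
  | w :: t, nw =>
    if m0.contains w || nw.contains w then pvCollect mx m0 t nw
    else if pvLimGe mx nw.length then pvCollect mx m0 t nw
    else pvCollect mx m0 t (nw ++ [w])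

-- the fresh words of ws (not in m0, not in seen), first occurrences, uncapped
def pvNew (m0 : PySem.Dict String Int) : List String → List String → List String
  | _, [] => []
  | seen, w :: t =>
    if m0.contains w || seen.contains w then pvNew m0 seen t
    else w :: pvNew m0 (seen ++ [w]) t

-- the remaining-budget cap B applies by slicing
def pvCap (mx : Option Int) (n : Nat) (l : List String) : List String :=
  match mx with
  | none => l
  | some k => l.take (k - (n : Int)).toNat

theorem pvD_append (m0 : PySem.Dict String Int) (base : Int) (nw : List String) (w : String) :
    pvD m0 base (nw ++ [w]) = (pvD m0 base nw).insert w (base + nw.length) := by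
  unfold pvD
  rw [PySem.List.enumerate_append, List.foldl_append]
  simp [PySem.List.enumerate_cons, PySem.List.enumerate_nil]

theorem pvD_contains (base : Int) (nw : List String) :
    ∀ (d : PySem.Dict String Int) (s : Int) (x : String),
    ((PySem.List.enumerate nw s).foldl (fun d iw => d.insert iw.2 (base + iw.1)) d).contains x
      = (d.contains x || nw.contains x) := by
  induction nw with
  | nil => intro d s x; simp [PySem.List.enumerate_nil]
  | cons w t ih =>
    intro d s x
    rw [PySem.List.enumerate_cons]
    simp only [List.foldl_cons, ih]
    by_cases hxw : x = w <;>
      simp [hxw, PySem.Dict.contains_insert, Bool.or_comm, Bool.or_left_comm]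

-- pvNew depends on the seen accumulator only through the combined membership test
theorem pvNew_congr (m0 : PySem.Dict String Int) :
    ∀ (t s s' : List String),
    (∀ x, (m0.contains x || s.contains x) = (m0.contains x || s'.contains x)) →
    pvNew m0 s t = pvNew m0 s' t := by
  intro t
  induction t with
  | nil => intro s s' _; rfl
  | cons w r ih =>
    intro s s' h
    simp only [pvNew]
    rw [h w]
    by_cases hw : (m0.contains w || s'.contains w) = true
    · rw [hw]
      exact ih s s' h
    · rw [Bool.eq_false_iff.mpr hw]
      simp only [Bool.false_eq_true, if_false]
      refine congrArg (w :: ·) (ih (s ++ [w]) (s' ++ [w]) ?_)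
      intro x
      simp only [List.contains_append, List.contains_cons, List.contains_nil, Bool.or_false]
      rw [← Bool.or_assoc, ← Bool.or_assoc, h x]

-- dedup-then-filter equals the interleaved fresh-word scan
theorem pvDedup_filter (m0 : PySem.Dict String Int) :
    ∀ (ws s : List String),
    (ws.foldl PySem.Set.add s).filter (fun w => !(m0.contains w))
      = s.filter (fun w => !(m0.contains w)) ++ pvNew m0 s ws := by
  intro ws
  induction ws with
  | nil => intro s; simp [pvNew]
  | cons w t ih =>
    intro s
    rw [List.foldl_cons]
    by_cases hs : w ∈ s
    · rw [PySem.Set.add_of_mem hs]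
      rw [ih s]
      have hsc : s.contains w = true := by simpa using hs
      rw [show pvNew m0 s (w :: t) = pvNew m0 s t by
        simp only [pvNew, hsc, Bool.or_true, if_true]]
    · rw [PySem.Set.add_of_not_mem hs, ih (s ++ [w]), List.filter_append]
      cases hm : m0.contains w with
      | true =>
        have hnew : pvNew m0 s (w :: t) = pvNew m0 s t := by
          simp only [pvNew]; rw [hm]; simp
        have hseen : pvNew m0 (s ++ [w]) t = pvNew m0 s t := by
          refine pvNew_congr m0 t (s ++ [w]) s ?_
          intro x
          simp only [List.contains_append, List.contains_cons, List.contains_nil, Bool.or_false]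
          by_cases hxw : x = w
          · subst hxw; rw [hm]; simp
          · rw [show (x == w) = false by simp [hxw], Bool.or_false]
        rw [hnew, ← hseen]
        simp [hm]
      | false =>
        have hnew : pvNew m0 s (w :: t) = w :: pvNew m0 (s ++ [w]) t := by
          simp only [pvNew]
          rw [hm, show s.contains w = false by simpa using hs]
          simp
        rw [hnew]
        simp [hm]

-- A's capped collection is the uncapped fresh list truncated by the remaining budget
theorem pvCollect_eq_cap (mx : Option Int) (m0 : PySem.Dict String Int) :
    ∀ (ws nw : List String),
    pvCollect mx m0 ws nw = nw ++ pvCap mx nw.length (pvNew m0 nw ws) := by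
  intro ws
  induction ws with
  | nil => intro nw; cases mx <;> simp [pvCollect, pvCap, pvNew]
  | cons w t ih =>
    intro nw
    simp only [pvCollect, pvNew]
    cases h1 : (m0.contains w || nw.contains w) with
    | true => rw [if_pos rfl]; exact ih nw
    | false =>
      simp only [Bool.false_eq_true, if_false]
      cases h2 : pvLimGe mx nw.length with
      | true =>
        rw [if_pos rfl, ih nw]
        rcases mx with _ | k
        · simp [pvLimGe] at h2
        · have hk : (k - (nw.length : Int)).toNat = 0 := by
            simp only [pvLimGe, decide_eq_true_eq, ge_iff_le] at h2
            omega
          simp [pvCap, hk]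
      | false =>
        simp only [Bool.false_eq_true, if_false]
        rw [ih (nw ++ [w])]
        rcases mx with _ | k
        · simp [pvCap]
        · have hk : (k - (nw.length : Int)).toNat = (k - ((nw ++ [w]).length : Int)).toNat + 1 := by
            simp only [pvLimGe, ge_iff_le, decide_eq_false_iff_not, not_le] at h2
            rw [List.length_append, List.length_cons, List.length_nil]
            push_cast
            omega
          simp only [pvCap, hk, List.take_succ_cons, List.append_assoc, List.cons_append,
            List.nil_append]

theorem pvLoopA (mx : Option Int) (m0 : PySem.Dict String Int) (base : Int) :
    ∀ (ws nw : List String),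
    ws.foldl (fun (st : PySem.Dict String Int × Int × List String) w =>
        if st.1.contains w then st
        else if pvLimGe mx st.2.2.length then st
        else (st.1.insert w st.2.1, st.2.1 + 1, st.2.2 ++ [w]))
      (pvD m0 base nw, base + nw.length, nw)
    = (pvD m0 base (pvCollect mx m0 ws nw), base + (pvCollect mx m0 ws nw).length,
       pvCollect mx m0 ws nw) := by
  intro ws
  induction ws with
  | nil => intro nw; simp [pvCollect]
  | cons w t ih =>
    intro nw
    rw [List.foldl_cons]
    dsimp only
    have hc : (pvD m0 base nw).contains w = (m0.contains w || nw.contains w) := by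
      unfold pvD; exact pvD_contains base nw m0 0 w
    rw [hc]
    cases h1 : (m0.contains w || nw.contains w) with
    | true =>
      rw [if_pos rfl, ih,
        show pvCollect mx m0 (w :: t) nw = pvCollect mx m0 t nw by
          simp only [pvCollect]; rw [h1]; simp]
    | false =>
      rw [if_neg (by simp)]
      cases h2 : pvLimGe mx nw.length with
      | true =>
        rw [if_pos rfl, ih,
          show pvCollect mx m0 (w :: t) nw = pvCollect mx m0 t nw by
            simp only [pvCollect]; rw [h1, h2]; simp]
      | false =>
        have hlen : base + (nw.length : Int) + 1 = base + (((nw ++ [w]).length : Nat) : Int) := by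
          rw [List.length_append, List.length_cons, List.length_nil]
          push_cast
          ring
        rw [if_neg (by simp),
          show ((pvD m0 base nw).insert w (base + (nw.length : Int)),
                base + (nw.length : Int) + 1, nw ++ [w])
              = (pvD m0 base (nw ++ [w]), base + (((nw ++ [w]).length : Nat) : Int), nw ++ [w]) by
            rw [pvD_append, ← hlen],
          ih,
          show pvCollect mx m0 (w :: t) nw = pvCollect mx m0 t (nw ++ [w]) by
            simp only [pvCollect]; rw [h1, h2]; simp]

-- ===== VERDICT (by name: the statement is the Claim_ definition above) =====
theorem build_merged_vocab_spec : Claim_equal_build_merged_vocab := by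
  intro pages lab1 mx _
  unfold Spec_build_merged_vocab build_merged_vocab build_merged_vocab_alt
  dsimp only
  rw [← List.foldl_flatten]
  set m0 : PySem.Dict String Int := PySem.Dict.ofList lab1 with hm0
  set base : Int := (match PySem.List.max? m0.values (fun x => x) with
    | some m => m + 1
    | none => 0) with hbase
  have hA := pvLoopA mx m0 base pages.flatten []
  rw [show ((pvD m0 base [] : PySem.Dict String Int), base + (([] : List String).length : Int),
      ([] : List String)) = (m0, base, ([] : List String)) from by simp [pvD]] at hA
  have hnw0 : (PySem.List.dedup (pages.flatMap (fun page => page))).filter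
      (fun w => !(m0.contains w)) = pvNew m0 [] pages.flatten := by
    rw [show pages.flatMap (fun page => page) = pages.flatten from by simp,
      PySem.List.dedup_eq_ofList, PySem.Set.ofList_eq_foldl]
    simpa using pvDedup_filter m0 pages.flatten []
  rcases mx with _ | k
  · have hC : pvCollect none m0 pages.flatten [] =
        (PySem.List.dedup (pages.flatMap (fun page => page))).filter (fun w => !(m0.contains w)) := by
      rw [pvCollect_eq_cap none m0 pages.flatten [], List.nil_append, hnw0]
      rfl
    exact (congrArg (fun (st : PySem.Dict String Int × Int × List String) =>
        ((if st.1.contains "<unk>" then st.1 else st.1.insert "<unk>" st.2.1).items, st.2.2)) hA).trans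
      (by rw [hC]; rfl)
  · have hC : pvCollect (some k) m0 pages.flatten [] =
        ((PySem.List.dedup (pages.flatMap (fun page => page))).filter
          (fun w => !(m0.contains w))).take (max 0 k).toNat := by
      rw [pvCollect_eq_cap (some k) m0 pages.flatten [], List.nil_append, hnw0]
      simp only [pvCap, List.length_nil]
      congr 1
      rcases le_total (0 : Int) k with h | h
      · rw [max_eq_right h]; omega
      · rw [max_eq_left h]; omega
    exact (congrArg (fun (st : PySem.Dict String Int × Int × List String) =>
        ((if st.1.contains "<unk>" then st.1 else st.1.insert "<unk>" st.2.1).items, st.2.2)) hA).trans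
      (by rw [hC]; rfl)
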